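-- pv_equiv track=rewrite | github.com/euske/kappa-ucs | mk10646.py | shrink_bits
-- ===== SOURCE A (Python) =====
-- def shrink_bits(bits):
--     a = ''
--     x0 = None
--     for b in bits:
--         b = ord(b)
--         x1 = 0
--         if b & 0xc0:
--             x1 |= 0x8
--         if b & 0x30:
--             x1 |= 0x4
--         if b & 0x0c:
--             x1 |= 0x2
--         if b & 0x03:
--             x1 |= 0x1
--         if x0 is not None:
--             a += chr(x0 << 4 | x1)
--             x0 = None
--         else:
--             x0 = x1
--     if x0 is not None:
--         a += chr(x0 << 4)
--     return a
-- ===== SOURCE B (Python) =====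
-- def shrink_bits(bits):
--     # Two-phase: map each byte to its nibble, then pack nibble pairs into chars.
--     nibs = []
--     for ch in bits:
--         b = ord(ch)
--         n = ((8 if b & 0xc0 else 0) | (4 if b & 0x30 else 0)
--              | (2 if b & 0x0c else 0) | (1 if b & 0x03 else 0))
--         nibs.append(n)
--     out = []
--     for i in range(0, len(nibs), 2):
--         hi = nibs[i]
--         lo = nibs[i + 1] if i + 1 < len(nibs) else 0
--         out.append(chr(hi << 4 | lo))
--     return ''.join(out)
-- ===== Notes on version B (the rewrite author's own statement) =====
-- stated objective: alternative
-- what changed: Replaces A's single-pass x0/x1 pending-nibble state machine with a two-phase map-then-pair structure: first compute every byte's nibble, then pack consecutive nibble pairs (padding an odd tail with 0) into output characters.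
import Mathlib
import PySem

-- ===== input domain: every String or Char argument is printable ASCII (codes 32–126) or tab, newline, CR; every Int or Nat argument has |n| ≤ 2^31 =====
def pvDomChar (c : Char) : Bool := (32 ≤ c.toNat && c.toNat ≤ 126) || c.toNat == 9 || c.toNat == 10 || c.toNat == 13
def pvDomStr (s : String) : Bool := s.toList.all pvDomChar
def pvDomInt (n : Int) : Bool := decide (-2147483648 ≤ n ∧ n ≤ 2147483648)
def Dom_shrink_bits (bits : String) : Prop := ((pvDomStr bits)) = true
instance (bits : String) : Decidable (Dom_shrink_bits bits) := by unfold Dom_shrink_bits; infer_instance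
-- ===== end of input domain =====

-- B replaces A's single-pass pending-nibble state machine with a map-then-pair
-- two-phase structure (same O(n) cost; objective: alternative decomposition).


-- ===== PORT A =====
-- A's loop: accumulator string and pending nibble x0 (none ↔ Python's None).
def shrinkStepA (st : List Char × Option Nat) (bc : Char) : List Char × Option Nat :=
  let b := bc.toNat
  let x1 : Nat := 0
  let x1 := if b &&& 0xc0 ≠ 0 then x1 ||| 0x8 else x1
  let x1 := if b &&& 0x30 ≠ 0 then x1 ||| 0x4 else x1
  let x1 := if b &&& 0x0c ≠ 0 then x1 ||| 0x2 else x1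
  let x1 := if b &&& 0x03 ≠ 0 then x1 ||| 0x1 else x1
  match st.2 with
  | some x0 => (st.1 ++ [Char.ofNat (x0 <<< 4 ||| x1)], none)
  | none => (st.1, some x1)

def shrink_bits (bits : String) : String :=
  let r := bits.toList.foldl shrinkStepA ([], none)
  match r.2 with
  | some x0 => String.mk (r.1 ++ [Char.ofNat (x0 <<< 4)])
  | none => String.mk r.1

-- ===== PORT B =====
-- Phase 1: per-byte nibble.
def nibOf (bc : Char) : Nat :=
  let b := bc.toNat
  (if b &&& 0xc0 ≠ 0 then 8 else 0) ||| (if b &&& 0x30 ≠ 0 then 4 else 0)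
    ||| (if b &&& 0x0c ≠ 0 then 2 else 0) ||| (if b &&& 0x03 ≠ 0 then 1 else 0)

-- Phase 2: pack consecutive nibble pairs, odd tail padded with 0.
def pairChars : List Nat → List Char
  | [] => []
  | [hi] => [Char.ofNat (hi <<< 4 ||| 0)]
  | hi :: lo :: t => Char.ofNat (hi <<< 4 ||| lo) :: pairChars t

def shrink_bits_alt (bits : String) : String :=
  String.mk (pairChars (bits.toList.map nibOf))

-- ===== PRECONDITION & SPEC =====
def Spec_shrink_bits (bits : String) (out : String) : Prop := out = shrink_bits_alt bits
instance (bits : String) (out : String) : Decidable (Spec_shrink_bits bits out) := by unfold Spec_shrink_bits; infer_instance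

-- ===== CLAIM (what is proved, stated in full; the proofs are below) =====
def Claim_equal_shrink_bits : Prop := ∀ (bits : String), Dom_shrink_bits bits → Spec_shrink_bits bits (shrink_bits bits)

-- ===== LEMMAS AND PROOFS =====
-- A's x1 after the four if-chains is exactly B's nibble.
theorem stepA_eq (st : List Char × Option Nat) (bc : Char) :
    shrinkStepA st bc =
      match st.2 with
      | some x0 => (st.1 ++ [Char.ofNat (x0 <<< 4 ||| nibOf bc)], none)
      | none => (st.1, some (nibOf bc)) := by
  simp only [shrinkStepA, nibOf]
  split_ifs <;> rfl

-- "finish" of A's state after the loop.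
def finishA (st : List Char × Option Nat) : List Char :=
  match st.2 with
  | some x0 => st.1 ++ [Char.ofNat (x0 <<< 4)]
  | none => st.1

-- Loop invariant: A's fold from either state equals acc ++ the packed nibbles.
theorem foldA_eq (cs : List Char) : ∀ (acc : List Char),
    (finishA (cs.foldl shrinkStepA (acc, none)) = acc ++ pairChars (cs.map nibOf)) ∧
    (∀ x : Nat, finishA (cs.foldl shrinkStepA (acc, some x)) =
        acc ++ pairChars (x :: cs.map nibOf)) := by
  induction cs with
  | nil =>
    intro acc
    refine ⟨by simp [finishA, pairChars], fun x => ?_⟩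
    simp [finishA, pairChars, Nat.or_zero]
  | cons c t ih =>
    intro acc
    constructor
    · simp only [List.foldl_cons, stepA_eq]
      exact (ih acc).2 (nibOf c)
    · intro x
      simp only [List.foldl_cons, stepA_eq]
      have := (ih (acc ++ [Char.ofNat (x <<< 4 ||| nibOf c)])).1
      simp only [this, List.map_cons, pairChars, List.append_assoc, List.cons_append,
        List.nil_append]

-- ===== VERDICT (by name: the statement is the Claim_ definition above) =====
theorem shrink_bits_spec : Claim_equal_shrink_bits := by
  intro bits _
  unfold Spec_shrink_bits shrink_bits shrink_bits_alt
  have h := (foldA_eq bits.toList []).1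
  simp only [finishA] at h
  rcases hr : (bits.toList.foldl shrinkStepA ([], none)) with ⟨a, x0⟩
  rw [hr] at h
  cases x0 <;> simp_all
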